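-- pv_equiv track=rewrite | github.com/anwari32/sequence-processing | seqproc/utils/z_curve.py | get_z_curve
-- ===== SOURCE A (Python) =====
-- def get_z_curve(seq):
--     """
--     Generate array of (x, y, z) coordinate from a sequence.
--     @param seq : Sequence to be coverted.
--     @return : Array of coordinates.
--     """
--     nucleotides = {
--         'A': 0,
--         'T': 0,
--         'G': 0,
--         'C': 0
--     }
--     z_coordinates = []
--     for c in seq:
--         nucleotides[c] += 1
--         xn = (nucleotides['A'] + nucleotides['G']) - (nucleotides['C'] + nucleotides['T'])
--         yn = (nucleotides['A'] + nucleotides['C']) - (nucleotides['G'] + nucleotides['T'])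
--         zn = (nucleotides['A'] + nucleotides['T']) - (nucleotides['G'] + nucleotides['C'])
--         z_coordinates.append(
--             (xn, yn, zn)
--         )
--     return z_coordinates
-- ===== SOURCE B (Python) =====
-- def _prefix_sums(vals):
--     total = 0
--     out = []
--     for v in vals:
--         total += v
--         out.append(total)
--     return out
--
--
-- def get_z_curve(seq):
--     """
--     Generate array of (x, y, z) coordinate from a sequence.
--     Staged-passes formulation: split the problem per axis -- map each
--     nucleotide to its signed step on each of the three axes, prefix-sum
--     each axis stream separately, and zip the three streams back together.
--     """
--     delta = {
--         'A': (1, 1, 1),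
--         'G': (1, -1, -1),
--         'C': (-1, 1, -1),
--         'T': (-1, -1, 1),
--     }
--     steps = [delta[c] for c in seq]
--     xs = _prefix_sums([s[0] for s in steps])
--     ys = _prefix_sums([s[1] for s in steps])
--     zs = _prefix_sums([s[2] for s in steps])
--     return list(zip(xs, ys, zs))
-- ===== Notes on version B (the rewrite author's own statement) =====
-- stated objective: alternative
-- what changed: B decomposes the computation into staged passes: map each nucleotide to per-axis signed steps, prefix-sum the three axis streams independently, and zip them, instead of A's single loop over four occurrence counters recomputed into coordinates at each step.
import Mathlib
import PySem

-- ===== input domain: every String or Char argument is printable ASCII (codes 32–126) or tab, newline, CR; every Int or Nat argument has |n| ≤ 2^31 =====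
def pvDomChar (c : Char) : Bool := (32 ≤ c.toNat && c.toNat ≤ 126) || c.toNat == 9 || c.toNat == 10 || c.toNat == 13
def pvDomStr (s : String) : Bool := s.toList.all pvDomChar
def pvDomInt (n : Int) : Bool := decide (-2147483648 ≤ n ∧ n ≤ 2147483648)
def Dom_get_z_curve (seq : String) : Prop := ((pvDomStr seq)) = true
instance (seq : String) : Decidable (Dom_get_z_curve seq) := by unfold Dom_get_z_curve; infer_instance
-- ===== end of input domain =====

-- B replaces A's single loop over four occurrence counters by staged passes:
-- map nucleotides to per-axis signed steps, prefix-sum each axis stream, zip the streams.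

-- ===== PORT A =====
-- step of A's loop: bump the counter for c, recompute (xn, yn, zn) from the four counts, append
def zStepA (st : PySem.Dict Char Int × List (Int × Int × Int)) (c : Char) :
    PySem.Dict Char Int × List (Int × Int × Int) :=
  let d := st.1.modify c 0 (· + 1)
  let xn := (d.getD 'A' 0 + d.getD 'G' 0) - (d.getD 'C' 0 + d.getD 'T' 0)
  let yn := (d.getD 'A' 0 + d.getD 'C' 0) - (d.getD 'G' 0 + d.getD 'T' 0)
  let zn := (d.getD 'A' 0 + d.getD 'T' 0) - (d.getD 'G' 0 + d.getD 'C' 0)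
  (d, st.2 ++ [(xn, yn, zn)])

def get_z_curve (seq : String) : List (Int × Int × Int) :=
  (seq.toList.foldl zStepA
    (PySem.Dict.ofList [('A', (0 : Int)), ('T', 0), ('G', 0), ('C', 0)], [])).2

-- ===== PORT B =====
-- the delta table (dict lookup; the default is never reached on Pre_-admitted inputs)
def zDelta (c : Char) : Int × Int × Int :=
  (PySem.Dict.ofList
    [('A', ((1 : Int), (1 : Int), (1 : Int))), ('G', (1, -1, -1)),
     ('C', (-1, 1, -1)), ('T', (-1, -1, 1))]).getD c (0, 0, 0)

-- Source B's _prefix_sums: running total, appending each partial sum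
def prefixSums (vals : List Int) : List Int :=
  (vals.foldl (fun st v => (st.1 + v, st.2 ++ [st.1 + v])) ((0 : Int), [])).2

def get_z_curve_alt (seq : String) : List (Int × Int × Int) :=
  let steps := seq.toList.map zDelta
  let xs := prefixSums (steps.map (·.1))
  let ys := prefixSums (steps.map (·.2.1))
  let zs := prefixSums (steps.map (·.2.2))
  xs.zip (ys.zip zs)

-- ===== PRECONDITION & SPEC =====
-- A (and B) raise KeyError on any character outside {'A','T','G','C'}; Pre_ excludes exactly those.
def Pre_get_z_curve (seq : String) : Prop :=
  seq.toList.all (fun c => c = 'A' ∨ c = 'T' ∨ c = 'G' ∨ c = 'C') = true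
instance (seq : String) : Decidable (Pre_get_z_curve seq) := by unfold Pre_get_z_curve; infer_instance

def pvWitness_get_z_curve : String := "GATTACA"

def Spec_get_z_curve (seq : String) (out : List (Int × Int × Int)) : Prop := out = get_z_curve_alt seq
instance (seq : String) (out : List (Int × Int × Int)) : Decidable (Spec_get_z_curve seq out) := by unfold Spec_get_z_curve; infer_instance

-- ===== CLAIM (what is proved, stated in full; the proofs are below) =====
def Claim_equal_get_z_curve : Prop := ∀ (seq : String), Dom_get_z_curve seq → Pre_get_z_curve seq → Spec_get_z_curve seq (get_z_curve seq)

-- ===== LEMMAS AND PROOFS =====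

-- common reference scan both programs are reduced to
def zipScan (p : Int × Int × Int) : List Char → List (Int × Int × Int)
  | [] => []
  | c :: t =>
    let d := zDelta c
    let q := (p.1 + d.1, p.2.1 + d.2.1, p.2.2 + d.2.2)
    q :: zipScan q t

def scanSum (t : Int) : List Int → List Int
  | [] => []
  | v :: l => (t + v) :: scanSum (t + v) l

theorem zDelta_A : zDelta 'A' = (1, 1, 1) := by decide
theorem zDelta_G : zDelta 'G' = (1, -1, -1) := by decide
theorem zDelta_C : zDelta 'C' = (-1, 1, -1) := by decide
theorem zDelta_T : zDelta 'T' = (-1, -1, 1) := by decide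

theorem prefixSums_loop (l : List Int) :
    ∀ (t : Int) (acc : List Int),
      (l.foldl (fun st v => (st.1 + v, st.2 ++ [st.1 + v])) (t, acc)).2 = acc ++ scanSum t l := by
  induction l with
  | nil => intro t acc; simp [scanSum]
  | cons v l ih => intro t acc; simp [scanSum, ih]

theorem prefixSums_eq (l : List Int) : prefixSums l = scanSum 0 l := by
  simpa using prefixSums_loop l 0 []

-- the three zipped axis scans are the joint scan
theorem zip_scan_eq (l : List Char) :
    ∀ (x y z : Int),
      (scanSum x (l.map (fun s => (zDelta s).1))).zip
        ((scanSum y (l.map (fun s => (zDelta s).2.1))).zip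
          (scanSum z (l.map (fun s => (zDelta s).2.2)))) = zipScan (x, y, z) l := by
  induction l with
  | nil => intro x y z; simp [zipScan, scanSum]
  | cons c t ih => intro x y z; simp [scanSum, zipScan, ih]

theorem alt_eq_zipScan (seq : String) :
    get_z_curve_alt seq = zipScan (0, 0, 0) seq.toList := by
  unfold get_z_curve_alt
  simp only [prefixSums_eq, List.map_map]
  exact zip_scan_eq seq.toList 0 0 0

-- A's loop invariant: its output is the joint scan started at the coordinates of its counters
theorem cons_scan_eq (acc : List (Int × Int × Int)) (p q : Int × Int × Int)
    (t : List Char) (h : p = q) : acc ++ p :: zipScan p t = acc ++ q :: zipScan q t := by rw [h]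

theorem a_loop_eq (l : List Char)
    (hl : ∀ c ∈ l, c = 'A' ∨ c = 'T' ∨ c = 'G' ∨ c = 'C') :
    ∀ (d : PySem.Dict Char Int) (acc : List (Int × Int × Int)),
    (l.foldl zStepA (d, acc)).2 =
      acc ++ zipScan
        (d.getD 'A' 0 + d.getD 'G' 0 - (d.getD 'C' 0 + d.getD 'T' 0),
         d.getD 'A' 0 + d.getD 'C' 0 - (d.getD 'G' 0 + d.getD 'T' 0),
         d.getD 'A' 0 + d.getD 'T' 0 - (d.getD 'G' 0 + d.getD 'C' 0)) l := by
  induction l with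
  | nil => intro d acc; simp [zipScan]
  | cons c t ih =>
    intro d acc
    have hc := hl c (List.mem_cons_self ..)
    have ht : ∀ c ∈ t, c = 'A' ∨ c = 'T' ∨ c = 'G' ∨ c = 'C' :=
      fun x hx => hl x (List.mem_cons_of_mem _ hx)
    simp only [List.foldl_cons]
    rcases hc with h | h | h | h <;> subst h <;>
      simp only [zStepA, ih ht, PySem.Dict.getD_modify, zipScan, zDelta_A, zDelta_G, zDelta_C,
        zDelta_T, reduceIte, Char.reduceEq, List.append_assoc, List.singleton_append] <;>
      exact cons_scan_eq _ _ _ _ (by simp only [Prod.mk.injEq]; refine ⟨by omega, by omega, by omega⟩)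

theorem get_z_curve_eq (seq : String) (h : Pre_get_z_curve seq) :
    get_z_curve seq = get_z_curve_alt seq := by
  unfold get_z_curve
  have hl : ∀ c ∈ seq.toList, c = 'A' ∨ c = 'T' ∨ c = 'G' ∨ c = 'C' := by
    unfold Pre_get_z_curve at h
    simpa using h
  rw [alt_eq_zipScan]
  simpa using a_loop_eq seq.toList hl
    (PySem.Dict.ofList [('A', (0 : Int)), ('T', 0), ('G', 0), ('C', 0)]) []

-- ===== VERDICT (by name: the statement is the Claim_ definition above) =====
theorem get_z_curve_spec : Claim_equal_get_z_curve := by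
  intro seq _ hpre
  exact get_z_curve_eq seq hpre
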